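-- pv_equiv track=rewrite | github.com/baldmer/cqa_kv-mem_oovkg | preprocessing/binarize_corpus.py | binarize_kg_target
-- ===== SOURCE A (Python) =====
-- PAD_KB_SYMBOL = '<pad_kb>'
--
-- NKB_SYMBOL = '<nkb>'
--
-- KB_OV_IDX = 1
--
-- MAX_TARGET_SIZE = 10
--
-- def pad_or_clip_target(target_list):
--
--     if len(target_list) > MAX_TARGET_SIZE:
--         target_list = target_list[:MAX_TARGET_SIZE]
--     elif len(target_list) < MAX_TARGET_SIZE:
--         pad_length = MAX_TARGET_SIZE - len(target_list)
--         target_list = target_list + [PAD_KB_SYMBOL] * pad_length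
--
--     return target_list
--
-- def isQid(input_str, entity_id_map):
--     if input_str.upper() not in entity_id_map:
--         return False
--
--     if len(input_str) == 0:
--         return False
--
--     if input_str in [PAD_KB_SYMBOL, NKB_SYMBOL]:
--         return True
--
--     char0 = input_str[0]
--     rem_chars = input_str[1:]
--
--     if char0 != 'Q' and char0 !='q':
--         return False
--
--     try:
--         x = int(rem_chars)
--     except:
--         return False
--
--     return True
--
-- def binarize_kg_target(target, entity_id_map):
--     '''these are the ground truth entities'''
--
--     target_ids = []
--     target = target.rstrip()
--
--     if len(target) > 0:
--         target = target.split("|")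
--     else:
--         target = []
--
--     target = pad_or_clip_target(target)
--
--     for qid in target:
--         if isQid(qid, entity_id_map):
--             ident = entity_id_map[qid]
--             target_ids.append(ident)
--         elif qid != PAD_KB_SYMBOL:
--             target_ids.append(KB_OV_IDX)
--         else:
--             target_ids.append(entity_id_map[PAD_KB_SYMBOL])
--
--     return target_ids
-- ===== SOURCE B (Python) =====
-- PAD_KB_SYMBOL = '<pad_kb>'
-- NKB_SYMBOL = '<nkb>'
-- KB_OV_IDX = 1
-- MAX_TARGET_SIZE = 10
--
-- def _qid_like(tok):
--     # shape-only test: the NKB symbol, or 'Q'/'q' followed by an int()-parsable tail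
--     if tok == NKB_SYMBOL:
--         return True
--     if not tok or tok[0] not in ('Q', 'q'):
--         return False
--     try:
--         int(tok[1:])
--         return True
--     except ValueError:
--         return False
--
-- def _tok_id(tok, entity_id_map):
--     if tok == PAD_KB_SYMBOL:
--         return entity_id_map[PAD_KB_SYMBOL]
--     if _qid_like(tok) and tok.upper() in entity_id_map:
--         return entity_id_map[tok]
--     return KB_OV_IDX
--
-- def _emit(tokens, n, entity_id_map):
--     # emit exactly n ids: real tokens first, then PAD ids for the remainder
--     if n == 0:
--         return []
--     if not tokens:
--         return [entity_id_map[PAD_KB_SYMBOL]] * n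
--     return [_tok_id(tokens[0], entity_id_map)] + _emit(tokens[1:], n - 1, entity_id_map)
--
-- def binarize_kg_target(target, entity_id_map):
--     '''these are the ground truth entities'''
--     text = target.rstrip()
--     tokens = text.split("|") if text else []
--     return _emit(tokens, MAX_TARGET_SIZE, entity_id_map)
-- ===== Notes on version B (the rewrite author's own statement) =====
-- stated objective: alternative
-- what changed: B replaces A's three staged passes (clip the token list, pad it with '<pad_kb>' tokens, then classify every padded token through isQid in a foldl loop) with one fused recursion driven by a fuel counter of 10 that cons-builds the id list, special-cases the PAD token first with a shape-only qid test, and emits PAD ids directly once the real tokens run out.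
import Mathlib
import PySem

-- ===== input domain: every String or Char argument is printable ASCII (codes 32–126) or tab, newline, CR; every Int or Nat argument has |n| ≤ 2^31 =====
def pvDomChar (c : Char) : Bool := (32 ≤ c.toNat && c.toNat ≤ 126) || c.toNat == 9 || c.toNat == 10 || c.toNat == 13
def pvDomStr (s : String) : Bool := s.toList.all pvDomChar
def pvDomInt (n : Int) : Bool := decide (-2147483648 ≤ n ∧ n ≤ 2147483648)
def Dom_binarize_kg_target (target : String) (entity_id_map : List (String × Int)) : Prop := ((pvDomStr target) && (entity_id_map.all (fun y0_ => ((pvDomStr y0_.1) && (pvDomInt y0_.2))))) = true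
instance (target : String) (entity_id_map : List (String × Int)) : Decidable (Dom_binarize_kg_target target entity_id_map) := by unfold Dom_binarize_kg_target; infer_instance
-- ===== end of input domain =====

-- B replaces A's three staged passes (clip, pad with symbol tokens, classify every
-- padded token through isQid) by one fused structural recursion with a fuel counter
-- of 10 that cons-builds the ids and emits PAD ids directly when tokens run out;
-- objective: alternative. Equivalence is about the return value only.

-- ===== PORT A =====
def PAD_KB_SYMBOL : String := "<pad_kb>"
def NKB_SYMBOL : String := "<nkb>"
def KB_OV_IDX : Int := 1
def MAX_TARGET_SIZE : Nat := 10

def pad_or_clip_target (target_list : List String) : List String :=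
  if target_list.length > MAX_TARGET_SIZE then
    target_list.take MAX_TARGET_SIZE
  else if target_list.length < MAX_TARGET_SIZE then
    target_list ++ List.replicate (MAX_TARGET_SIZE - target_list.length) PAD_KB_SYMBOL
  else target_list

def isQid (input_str : String) (entity_id_map : List (String × Int)) : Bool :=
  if !((PySem.Dict.mk entity_id_map).contains (PySem.Str.upper input_str)) then
    false
  else if PySem.Str.len input_str == 0 then
    false
  else if input_str == PAD_KB_SYMBOL || input_str == NKB_SYMBOL then
    true
  else
    match PySem.Str.pyGet? input_str 0 with
    | none => false  -- unreachable: len input_str > 0 here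
    | some char0 =>
      let rem_chars := PySem.Str.slice input_str (some 1) none
      if char0 != 'Q' && char0 != 'q' then false
      else (PySem.Int.ofStr? rem_chars).isSome  -- try: int(rem_chars) except: False

def binarize_kg_target (target : String) (entity_id_map : List (String × Int)) : List Int :=
  let target1 := PySem.Str.rstrip target
  let tlist : List String :=
    if PySem.Str.len target1 > 0 then (PySem.Str.split? target1 "|").getD [] else []
  let tlist := pad_or_clip_target tlist
  -- dict lookups: getD 0 — Pre_ excludes the inputs where Python raises KeyError
  tlist.foldl (fun target_ids qid =>
    if isQid qid entity_id_map then
      target_ids ++ [(PySem.Dict.mk entity_id_map).getD qid 0]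
    else if qid != PAD_KB_SYMBOL then
      target_ids ++ [KB_OV_IDX]
    else
      target_ids ++ [(PySem.Dict.mk entity_id_map).getD PAD_KB_SYMBOL 0]) []

-- ===== PORT B =====
def qid_like (tok : String) : Bool :=
  if tok == NKB_SYMBOL then true
  else if tok == "" || !((PySem.Str.pyGet? tok 0 == some 'Q') || (PySem.Str.pyGet? tok 0 == some 'q')) then false
  else (PySem.Int.ofStr? (PySem.Str.slice tok (some 1) none)).isSome

def tok_id (tok : String) (entity_id_map : List (String × Int)) : Int :=
  if tok == PAD_KB_SYMBOL then (PySem.Dict.mk entity_id_map).getD PAD_KB_SYMBOL 0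
  else if qid_like tok && (PySem.Dict.mk entity_id_map).contains (PySem.Str.upper tok) then
    (PySem.Dict.mk entity_id_map).getD tok 0
  else KB_OV_IDX

def emit (entity_id_map : List (String × Int)) : List String → Nat → List Int
  | _, 0 => []
  | [], n + 1 => List.replicate (n + 1) ((PySem.Dict.mk entity_id_map).getD PAD_KB_SYMBOL 0)
  | t :: ts, n + 1 => tok_id t entity_id_map :: emit entity_id_map ts n

def binarize_kg_target_alt (target : String) (entity_id_map : List (String × Int)) : List Int :=
  let text := PySem.Str.rstrip target
  let tokens : List String := if text != "" then (PySem.Str.split? text "|").getD [] else []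
  emit entity_id_map tokens MAX_TARGET_SIZE

-- ===== PRECONDITION & SPEC =====
-- shape of a token that passes isQid's non-membership tests (input shape only:
-- the literal PAD/NKB symbols, or 'Q'/'q' followed by an int()-parsable string)
def qidShape (q : String) : Bool :=
  q == PAD_KB_SYMBOL || q == NKB_SYMBOL ||
  (match q.toList with
   | [] => false
   | c :: rest => (c == 'Q' || c == 'q') && (PySem.Int.ofChars? rest).isSome)

-- Pre_ excludes exactly the inputs where Python A raises KeyError: a real token whose
-- uppercase is a key but which itself is not, or padding/a literal '<pad_kb>' token
-- while '<pad_kb>' is not a key.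
def Pre_binarize_kg_target (target : String) (entity_id_map : List (String × Int)) : Prop :=
  let text := PySem.Str.rstrip target
  let toks : List String :=
    (if PySem.Str.len text > 0 then (PySem.Str.split? text "|").getD [] else []).take MAX_TARGET_SIZE
  (∀ q ∈ toks, qidShape q = true →
      (PySem.Dict.mk entity_id_map).contains (PySem.Str.upper q) = true →
      (PySem.Dict.mk entity_id_map).contains q = true)
  ∧ ((toks.length < MAX_TARGET_SIZE ∨ PAD_KB_SYMBOL ∈ toks) →
      (PySem.Dict.mk entity_id_map).contains PAD_KB_SYMBOL = true)
instance (target : String) (entity_id_map : List (String × Int)) : Decidable (Pre_binarize_kg_target target entity_id_map) := by unfold Pre_binarize_kg_target; infer_instance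

def pvWitness_binarize_kg_target : String × (List (String × Int)) :=
  ("Q1|foo", [("Q1", 5), ("<pad_kb>", 0)])

def Spec_binarize_kg_target (target : String) (entity_id_map : List (String × Int)) (out : List Int) : Prop := out = binarize_kg_target_alt target entity_id_map
instance (target : String) (entity_id_map : List (String × Int)) (out : List Int) : Decidable (Spec_binarize_kg_target target entity_id_map out) := by unfold Spec_binarize_kg_target; infer_instance

-- ===== CLAIM (what is proved, stated in full; the proofs are below) =====
def Claim_equal_binarize_kg_target : Prop := ∀ (target : String) (entity_id_map : List (String × Int)), Dom_binarize_kg_target target entity_id_map → Pre_binarize_kg_target target entity_id_map → Spec_binarize_kg_target target entity_id_map (binarize_kg_target target entity_id_map)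

-- ===== LEMMAS AND PROOFS =====

-- B's token id equals A's loop body on every token
theorem tok_id_eq_bodyA (q : String) (m : List (String × Int)) :
    tok_id q m =
      (if isQid q m then (PySem.Dict.mk m).getD q 0
       else if q != PAD_KB_SYMBOL then KB_OV_IDX
       else (PySem.Dict.mk m).getD PAD_KB_SYMBOL 0) := by
  by_cases hpad : q = PAD_KB_SYMBOL
  · subst hpad
    unfold tok_id
    by_cases h : isQid PAD_KB_SYMBOL m <;> simp [h]
  · have hlike : (qid_like q && (PySem.Dict.mk m).contains (PySem.Str.upper q)) = isQid q m := by
      unfold isQid qid_like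
      by_cases hc : (PySem.Dict.mk m).contains (PySem.Str.upper q) = true
      · by_cases hq : q = ""
        · subst hq; simp [hc]; decide
        · have hne : q.toList ≠ [] := fun h => hq (String.toList_eq_nil_iff.mp h)
          match hl : q.toList with
          | [] => exact absurd hl hne
          | c :: rest =>
            by_cases hnkb : q = NKB_SYMBOL
            · simp [hnkb]
              intro _ _; decide
            · by_cases hQ : c = 'Q' ∨ c = 'q'
              · rcases hQ with h | h <;> subst h <;>
                  simp [hc, hpad, hnkb, hq, hl] <;> (intro _; omega)
              · have hQ' : c ≠ 'Q' ∧ c ≠ 'q' := ⟨fun h => hQ (Or.inl h), fun h => hQ (Or.inr h)⟩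
                simp [hc, hpad, hnkb, hq, hl, hQ'.1, hQ'.2]
      · rw [Bool.not_eq_true] at hc
        simp [hc]
    unfold tok_id
    rw [if_neg (by simpa using hpad), hlike]
    by_cases h : isQid q m <;> simp [h, hpad]

-- on the PAD symbol B's id is the PAD lookup, definitionally
theorem tok_id_pad (m : List (String × Int)) :
    tok_id PAD_KB_SYMBOL m = (PySem.Dict.mk m).getD PAD_KB_SYMBOL 0 := by
  unfold tok_id; simp

-- what the fused recursion computes: ids of the first n tokens, then pad ids
theorem emit_eq (m : List (String × Int)) (n : Nat) (toks : List String) :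
    emit m toks n =
      (toks.take n).map (fun t => tok_id t m) ++
        List.replicate (n - toks.length) ((PySem.Dict.mk m).getD PAD_KB_SYMBOL 0) := by
  induction n generalizing toks with
  | zero => simp [emit]
  | succ n ih =>
    cases toks with
    | nil => simp [emit]
    | cons t ts => simp [emit, ih ts, Nat.succ_sub_succ]

theorem len_pos_iff_ne_empty (s : String) :
    (PySem.Str.len s > 0) ↔ (s ≠ "") := by
  rw [PySem.Str.len_eq]
  constructor
  · intro h he; subst he; simp at h
  · intro h
    have hne : s.toList ≠ [] := fun hl => h (String.toList_eq_nil_iff.mp hl)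
    have := List.length_pos_iff.mpr hne
    omega

theorem binarize_main (target : String) (entity_id_map : List (String × Int)) :
    binarize_kg_target target entity_id_map = binarize_kg_target_alt target entity_id_map := by
  simp only [binarize_kg_target, binarize_kg_target_alt, pad_or_clip_target]
  have hbody : (fun (target_ids : List Int) (qid : String) =>
      if isQid qid entity_id_map then target_ids ++ [(PySem.Dict.mk entity_id_map).getD qid 0]
      else if qid != PAD_KB_SYMBOL then target_ids ++ [KB_OV_IDX]
      else target_ids ++ [(PySem.Dict.mk entity_id_map).getD PAD_KB_SYMBOL 0]) =
      (fun (acc : List Int) (qid : String) => acc ++ [tok_id qid entity_id_map]) := by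
    funext acc qid; rw [tok_id_eq_bodyA]; split_ifs <;> rfl
  rw [hbody, PySem.List.foldl_append_singleton_eq_map, List.nil_append]
  have htl : (if (PySem.Str.rstrip target != "") = true
        then (PySem.Str.split? (PySem.Str.rstrip target) "|").getD [] else []) =
      (if PySem.Str.len (PySem.Str.rstrip target) > 0
        then (PySem.Str.split? (PySem.Str.rstrip target) "|").getD [] else []) := by
    by_cases h : PySem.Str.rstrip target = ""
    · rw [if_neg (by simp [h]), if_neg (by rw [len_pos_iff_ne_empty]; simp [h])]
    · rw [if_pos (by simp [bne_iff_ne, h]), if_pos ((len_pos_iff_ne_empty _).mpr h)]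
  rw [htl] at *
  set L : List String := (if PySem.Str.len (PySem.Str.rstrip target) > 0
      then (PySem.Str.split? (PySem.Str.rstrip target) "|").getD [] else []) with hL
  rw [emit_eq]
  by_cases hgt : L.length > MAX_TARGET_SIZE
  · rw [if_pos hgt]
    have : MAX_TARGET_SIZE - L.length = 0 := by omega
    rw [this]
    simp
  · have htk : L.take MAX_TARGET_SIZE = L := List.take_of_length_le (by omega)
    rw [if_neg hgt, htk]
    by_cases hlt : L.length < MAX_TARGET_SIZE
    · rw [if_pos hlt]
      simp only [List.map_append, List.map_replicate, tok_id_pad]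
    · rw [if_neg hlt]
      have : MAX_TARGET_SIZE - L.length = 0 := by omega
      rw [this]
      simp

-- ===== VERDICT (by name: the statement is the Claim_ definition above) =====
theorem binarize_kg_target_spec : Claim_equal_binarize_kg_target := by
  intro target entity_id_map _ _
  unfold Spec_binarize_kg_target
  exact binarize_main target entity_id_map
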